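-- pv_equiv track=rewrite | github.com/MarcVillain/acdc-toolkit | misc/helpers.py | get_arg_number
-- ===== SOURCE A (Python) =====
-- def get_arg_number(line, begidx):
--     argnum = 0
--     start = 0
--     while start < len(line) and line[start] == ' ':
--         start += 1
--     for i in range(start + 1, min(len(line), begidx)):
--         if line[i] == ' ' and line[i - 1] != ' ':
--             argnum += 1
--     return argnum
-- ===== SOURCE B (Python) =====
-- def get_arg_number(line, begidx):
--     sub = line[:max(0, min(len(line), begidx))]
--     tokens = sub.split(' ')
--     return sum(1 for t in tokens[:-1] if t)
-- ===== Notes on version B (the rewrite author's own statement) =====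
-- stated objective: simpler
-- what changed: B slices the line up to the (clamped) cursor, splits it on single spaces, and counts the non-empty tokens before the last partial one, instead of A's index scan for word-to-space boundaries with a separate leading-space skip loop.
import Mathlib
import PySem

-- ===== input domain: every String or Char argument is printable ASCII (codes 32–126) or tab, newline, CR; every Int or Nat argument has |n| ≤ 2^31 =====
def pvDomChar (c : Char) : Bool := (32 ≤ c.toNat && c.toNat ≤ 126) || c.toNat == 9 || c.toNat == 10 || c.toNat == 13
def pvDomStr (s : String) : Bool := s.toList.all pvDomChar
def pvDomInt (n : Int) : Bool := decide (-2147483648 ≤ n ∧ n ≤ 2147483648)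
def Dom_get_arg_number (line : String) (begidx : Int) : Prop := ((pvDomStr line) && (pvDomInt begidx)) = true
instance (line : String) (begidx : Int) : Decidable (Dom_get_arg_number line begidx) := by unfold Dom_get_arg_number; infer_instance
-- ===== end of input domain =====

-- B builds the argument tokens with split(' ') and counts the completed non-empty ones;
-- A scans character indices for word→space boundaries. Same return value, simpler decomposition.

-- ===== PORT A =====
-- A's while loop `while start < len(line) and line[start] == ' ': start += 1` as structural recursion
def pvStartA : List Char → Nat
  | [] => 0
  | c :: rest => if c = ' ' then pvStartA rest + 1 else 0

def get_arg_number (line : String) (begidx : Int) : Int :=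
  -- for i in range(start + 1, min(len(line), begidx)): if line[i]==' ' and line[i-1]!=' ': argnum += 1
  -- indices in the range are always valid, so line[i] is PySem.List.pyGetD (no IndexError possible)
  (PySem.List.pyRange ((pvStartA line.toList : Int) + 1) (min (line.toList.length : Int) begidx) 1).foldl
    (fun argnum i =>
      if (PySem.List.pyGetD line.toList i ' ' == ' ' && !(PySem.List.pyGetD line.toList (i - 1) ' ' == ' ')) = true
      then argnum + 1 else argnum) 0

-- ===== PORT B =====
def get_arg_number_alt (line : String) (begidx : Int) : Int :=
  -- sub = line[:max(0, min(len(line), begidx))]; tokens = sub.split(' '); sum(1 for t in tokens[:-1] if t)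
  ((PySem.List.slice
      ((PySem.List.slice line.toList none (some (max 0 (min (line.toList.length : Int) begidx)))).splitOn ' ')
      none (some (-1))).countP (fun t => !t.isEmpty) : Int)

-- ===== PRECONDITION & SPEC =====
def Spec_get_arg_number (line : String) (begidx : Int) (out : Int) : Prop := out = get_arg_number_alt line begidx
instance (line : String) (begidx : Int) (out : Int) : Decidable (Spec_get_arg_number line begidx out) := by unfold Spec_get_arg_number; infer_instance

-- ===== CLAIM (what is proved, stated in full; the proofs are below) =====
def Claim_equal_get_arg_number : Prop := ∀ (line : String) (begidx : Int), Dom_get_arg_number line begidx → Spec_get_arg_number line begidx (get_arg_number line begidx)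

-- ===== LEMMAS AND PROOFS =====

-- the common intermediate value: number of word→space boundaries, as structural recursion
def gcnt : List Char → Nat
  | [] => 0
  | [_] => 0
  | a :: b :: r => (if b = ' ' ∧ a ≠ ' ' then 1 else 0) + gcnt (b :: r)

-- B's count, on the character list
def bcnt (u : List Char) : Nat :=
  ((u.splitOnP (· == ' ')).dropLast.countP (fun t => !t.isEmpty))

theorem gcnt_space (u : List Char) : gcnt (' ' :: u) = gcnt u := by
  cases u with
  | nil => rfl
  | cons d v => simp [gcnt]

theorem bcnt_space (u : List Char) : bcnt (' ' :: u) = bcnt u := by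
  unfold bcnt
  obtain ⟨x, l, hxl⟩ : ∃ x l, u.splitOnP (· == ' ') = x :: l := by
    cases h : u.splitOnP (· == ' ') with
    | nil => exact absurd h (List.splitOnP_ne_nil _ u)
    | cons x l => exact ⟨x, l, rfl⟩
  rw [List.splitOnP_cons, hxl]
  simp [List.dropLast_cons₂]

theorem gcnt_snoc (t : List Char) (x : Char) :
    gcnt (t ++ [x]) = gcnt t + (if x = ' ' ∧ t.getLastD ' ' ≠ ' ' then 1 else 0) := by
  induction t with
  | nil => simp [gcnt]
  | cons a r ih =>
    cases r with
    | nil => simp [gcnt, List.getLastD_eq_getLast?]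
    | cons b r' =>
      have h1 : gcnt (a :: ((b :: r') ++ [x]))
          = (if b = ' ' ∧ a ≠ ' ' then 1 else 0) + gcnt ((b :: r') ++ [x]) := rfl
      rw [show (a :: b :: r') ++ [x] = a :: ((b :: r') ++ [x]) from rfl, h1, ih]
      have h2 : (a :: b :: r').getLastD ' ' = (b :: r').getLastD ' ' := by
        simp [List.getLastD_eq_getLast?, List.getLast?_cons_cons]
      rw [show gcnt (a :: b :: r') = (if b = ' ' ∧ a ≠ ' ' then 1 else 0) + gcnt (b :: r') from rfl, h2]
      omega

theorem bcnt_eq_gcnt : ∀ (u : List Char), bcnt u = gcnt u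
  | [] => by simp [bcnt, gcnt]
  | c :: v => by
    by_cases hc : c = ' '
    · subst hc
      rw [bcnt_space, gcnt_space, bcnt_eq_gcnt v]
    · cases v with
      | nil =>
        simp [bcnt, gcnt, List.splitOnP_cons, hc]
      | cons d w =>
        obtain ⟨x, l, hxl⟩ : ∃ x l, w.splitOnP (· == ' ') = x :: l := by
          cases h : w.splitOnP (· == ' ') with
          | nil => exact absurd h (List.splitOnP_ne_nil _ w)
          | cons x l => exact ⟨x, l, rfl⟩
        by_cases hd : d = ' '
        · subst hd
          have hrec := bcnt_eq_gcnt w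
          have hsplit : (c :: ' ' :: w).splitOnP (· == ' ') = [c] :: x :: l := by
            rw [List.splitOnP_cons, List.splitOnP_cons, hxl]
            simp [hc]
          unfold bcnt
          rw [hsplit, List.dropLast_cons₂, List.countP_cons]
          rw [show gcnt (c :: ' ' :: w) = 1 + gcnt (' ' :: w) by simp [gcnt, hc]]
          rw [gcnt_space, ← hrec]
          unfold bcnt
          rw [hxl]
          simp
          omega
        · have hrec := bcnt_eq_gcnt (d :: w)
          have hb : bcnt (c :: d :: w) = bcnt (d :: w) := by
            unfold bcnt
            have hs1 : (d :: w).splitOnP (· == ' ') = (d :: x) :: l := by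
              rw [List.splitOnP_cons, hxl]
              simp [hd]
            have hs2 : (c :: d :: w).splitOnP (· == ' ') = (c :: d :: x) :: l := by
              rw [List.splitOnP_cons, hs1]
              simp [hc]
            rw [hs1, hs2]
            cases l with
            | nil => simp
            | cons e l' => simp [List.dropLast_cons₂]
          rw [hb, hrec]
          simp [gcnt, hd]
  termination_by u => u.length


-- characters strictly before pvStartA cs are spaces (and in range)
theorem pvStartA_le (cs : List Char) : pvStartA cs ≤ cs.length := by
  induction cs with
  | nil => simp [pvStartA]
  | cons c r ih => by_cases h : c = ' ' <;> simp [pvStartA, h] <;> omega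

theorem pvStartA_spec (cs : List Char) (j : Nat) (hj : j < pvStartA cs) :
    cs.getD j ' ' = ' ' := by
  induction cs generalizing j with
  | nil => simp [pvStartA] at hj
  | cons c r ih =>
    by_cases h : c = ' '
    · cases j with
      | zero => simpa [h]
      | succ j' =>
        simp [pvStartA, h] at hj
        simpa using ih j' (by omega)
    · simp [pvStartA, h] at hj

-- the loop predicate of A's port
def pvP (cs : List Char) (i : Int) : Bool :=
  PySem.List.pyGetD cs i ' ' == ' ' && !(PySem.List.pyGetD cs (i - 1) ' ' == ' ')

theorem pvP_false_low (cs : List Char) (i : Int) (h1 : 1 ≤ i) (hi : i ≤ (pvStartA cs : Int)) :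
    pvP cs i = false := by
  have hlen := pvStartA_le cs
  have hrange : i - 1 < (cs.length : Int) := by omega
  have : PySem.List.pyGetD cs (i - 1) ' ' = ' ' := by
    rw [PySem.List.pyGetD_eq_getElem cs ' ' (by omega) hrange]
    have h := pvStartA_spec cs (i - 1).toNat (by omega)
    rwa [List.getD_eq_getElem?_getD, List.getElem?_eq_getElem (by omega), Option.getD_some] at h
  simp [pvP, this]

-- counting over [1, n) equals gcnt of the prefix
theorem countP_range_eq_gcnt (cs : List Char) (k : Nat) (hk : k ≤ cs.length) :
    (PySem.List.pyRange 1 (k : Int) 1).countP (pvP cs) = gcnt (cs.take k) := by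
  induction k with
  | zero =>
    rw [PySem.List.pyRange_one_eq_nil (by omega)]
    simp [gcnt]
  | succ k ih =>
    cases k with
    | zero =>
      rw [PySem.List.pyRange_one_eq_nil (by omega)]
      cases cs with
      | nil => simp [gcnt]
      | cons a r => simp [gcnt]
    | succ k' =>
      have hk1 : (k' + 1 : Nat) ≤ cs.length := by omega
      have hcast : ((k' + 1 + 1 : Nat) : Int) = ((k' + 1 : Nat) : Int) + 1 := by push_cast; ring
      rw [hcast, PySem.List.pyRange_one_succ_right (by omega), List.countP_append]
      rw [ih hk1]
      have htake : cs.take (k' + 1 + 1) = cs.take (k' + 1) ++ [cs[k' + 1]] := by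
        rw [List.take_succ, List.getElem?_eq_getElem (by omega)]
        rfl
      rw [htake, gcnt_snoc]
      have hlast : (cs.take (k' + 1)).getLastD ' ' = cs[k'] := by
        have hne : cs.take (k' + 1) ≠ [] := by
          cases cs with
          | nil => simp at hk1
          | cons a r => simp
        rw [List.getLastD_eq_getLast?, List.getLast?_eq_getElem?]
        have hlen : (cs.take (k' + 1)).length = k' + 1 := by
          rw [List.length_take]; omega
        rw [hlen]
        simp only [Nat.add_sub_cancel]
        rw [List.getElem?_take, if_pos (by omega), List.getElem?_eq_getElem (by omega), Option.getD_some]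
        rfl
      have hpv : pvP cs ((k' + 1 : Nat) : Int) = decide (cs[k' + 1] = ' ' ∧ cs[k'] ≠ ' ') := by
        unfold pvP
        rw [PySem.List.pyGetD_eq_getElem cs ' ' (by positivity) (by exact_mod_cast by omega)]
        have : ((k' + 1 : Nat) : Int) - 1 = ((k' : Nat) : Int) := by push_cast; ring
        rw [this, PySem.List.pyGetD_eq_getElem cs ' ' (by positivity) (by exact_mod_cast by omega)]
        simp only [Int.toNat_natCast]
        by_cases h1 : cs[k' + 1] = ' ' <;> by_cases h2 : cs[k'] = ' ' <;> simp [h1, h2] <;> tauto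
      rw [List.countP_cons, List.countP_nil, hpv, hlast]
      by_cases h : cs[k' + 1] = ' ' ∧ cs[k'] ≠ ' ' <;> simp [h]

-- ===== VERDICT (by name: the statement is the Claim_ definition above) =====
theorem get_arg_number_spec : Claim_equal_get_arg_number := by
  intro line begidx _
  unfold Spec_get_arg_number get_arg_number get_arg_number_alt
  rw [PySem.List.slice_to_neg_one]
  set cs := line.toList with hcs
  set start := pvStartA cs with hstart
  set m : Int := min (cs.length : Int) begidx with hm
  -- normalize B's side
  rw [PySem.List.slice_to cs (le_max_left 0 m)]
  have hB : ((cs.take (max 0 m).toNat).splitOn ' ').dropLast.countP (fun t => !t.isEmpty)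
      = gcnt (cs.take (max 0 m).toNat) := bcnt_eq_gcnt _
  rw [hB]
  -- normalize A's side: fold -> countP
  rw [show (fun (argnum : Int) (i : Int) =>
        if (PySem.List.pyGetD cs i ' ' == ' ' && !(PySem.List.pyGetD cs (i - 1) ' ' == ' ')) = true
        then argnum + 1 else argnum)
      = (fun (argnum : Int) (i : Int) => if pvP cs i = true then argnum + 1 else argnum) from rfl]
  rw [PySem.List.foldl_count_if (pvP cs) _ 0]
  -- extend A's range down to 1
  have hA : (PySem.List.pyRange ((start : Int) + 1) m 1).countP (pvP cs)
      = (PySem.List.pyRange 1 m 1).countP (pvP cs) := by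
    by_cases hle : (start : Int) + 1 ≤ m
    · rw [PySem.List.pyRange_one_append 1 ((start : Int) + 1) m (by omega) hle, List.countP_append]
      have : (PySem.List.pyRange 1 ((start : Int) + 1) 1).countP (pvP cs) = 0 := by
        rw [List.countP_eq_zero]
        intro i hi
        rw [PySem.List.mem_pyRange_one] at hi
        simp [pvP_false_low cs i hi.1 (by omega)]
      omega
    · rw [PySem.List.pyRange_one_eq_nil (by omega), List.countP_nil]
      symm
      rw [List.countP_eq_zero]
      intro i hi
      rw [PySem.List.mem_pyRange_one] at hi
      simp [pvP_false_low cs i hi.1 (by omega)]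
  rw [hA]
  -- the shared index-count lemma
  have hkle : (max 0 m).toNat ≤ cs.length := by
    have : m ≤ (cs.length : Int) := min_le_left _ _
    omega
  have hrange : PySem.List.pyRange 1 m 1 = PySem.List.pyRange 1 ((max 0 m).toNat : Int) 1 := by
    by_cases h0 : 0 ≤ m
    · congr 1; omega
    · rw [PySem.List.pyRange_one_eq_nil (by omega), PySem.List.pyRange_one_eq_nil (by omega)]
  rw [hrange, countP_range_eq_gcnt cs (max 0 m).toNat hkle]
  omega
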